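-- pv_equiv track=rewrite | github.com/jinbaaaaaang/siot-OSS | backend/app/services/keyword_extractor.py | _remove_similar_keywords
-- ===== SOURCE A (Python) =====
-- from typing import List
--
-- def _remove_similar_keywords(keywords: List[str]) -> List[str]:
--     """
--     의미적으로 유사하거나 중복되는 키워드를 제거합니다.
--     - 한 키워드가 다른 키워드에 포함되는 경우 제거
--     - 너무 짧은 키워드(1-2자) 중복 제거
--     """
--     if not keywords:
--         return []
--
--     # 길이순 정렬 (긴 것부터) - 긴 키워드가 더 의미있음
--     sorted_kws = sorted(keywords, key=len, reverse=True)
--     result = []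
--     seen = set()
--
--     for kw in sorted_kws:
--         kw_lower = kw.lower()
--         # 이미 포함된 키워드인지 확인
--         is_duplicate = False
--         for existing in result:
--             existing_lower = existing.lower()
--             # 한 키워드가 다른 키워드에 포함되거나 동일한 경우
--             if kw_lower in existing_lower or existing_lower in kw_lower:
--                 if len(kw) < len(existing):
--                     # 더 짧은 키워드는 스킵
--                     is_duplicate = True
--                     break
--                 elif len(kw) > len(existing) and kw_lower != existing_lower:
--                     # 더 긴 키워드로 교체
--                     result.remove(existing)
--                     seen.discard(existing_lower)
--                     break
--
--         if not is_duplicate and kw_lower not in seen: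
--             result.append(kw)
--             seen.add(kw_lower)
--
--     return result
-- ===== SOURCE B (Python) =====
-- from typing import List
--
-- def _remove_similar_keywords(keywords: List[str]) -> List[str]:
--     # One pass over the keywords sorted longest-first, against a precomputed
--     # (length, lowercase) table in the same order: only the strictly longer
--     # prefix of the table can contain kw, so the scan breaks at kw's length.
--     # Substring transitivity makes scanning the whole input equivalent to
--     # scanning the kept subset; lowercase dedup keeps the first occurrence.
--     skws = sorted(keywords, key=len, reverse=True)
--     table = [(len(k), k.lower()) for k in skws]
--     out = []
--     seen = set()
--     for i, kw in enumerate(skws):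
--         lk, kl = table[i]
--         if kl in seen:
--             continue
--         keep = True
--         for n, low in table:
--             if n <= lk:
--                 break
--             if kl in low:
--                 keep = False
--                 break
--         if keep:
--             out.append(kw)
--             seen.add(kl)
--     return out
-- ===== Notes on version B (the rewrite author's own statement) =====
-- stated objective: alternative
-- what changed: B precomputes one (length, lowercase) table of the length-sorted input and decides each keyword by scanning only the strictly-longer prefix of that table (break at the keyword's own length), justified by substring transitivity, instead of A's rescan of the growing result list with its dead 'replace longer' branch and seen-set repair machinery.
import Mathlib
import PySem

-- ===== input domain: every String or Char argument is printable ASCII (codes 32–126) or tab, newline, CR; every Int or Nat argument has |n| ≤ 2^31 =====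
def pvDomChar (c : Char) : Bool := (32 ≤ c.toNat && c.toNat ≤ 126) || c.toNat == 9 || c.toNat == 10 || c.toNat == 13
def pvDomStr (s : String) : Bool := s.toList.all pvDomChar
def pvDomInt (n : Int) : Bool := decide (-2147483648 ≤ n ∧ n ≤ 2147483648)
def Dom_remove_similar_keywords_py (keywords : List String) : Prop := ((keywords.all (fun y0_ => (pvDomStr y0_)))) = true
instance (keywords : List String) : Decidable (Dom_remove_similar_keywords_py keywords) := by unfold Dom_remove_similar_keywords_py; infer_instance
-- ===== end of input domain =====

-- B replaces A's scan of the growing result list (with its dead "replace longer" branch)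
-- by one precomputed (length, lowercase) table of the length-sorted input, scanned only over
-- its strictly-longer prefix (break at kw's length); substring transitivity makes the two
-- containment tests agree.

-- ===== PORT A =====
/-- A's inner `for existing in result` loop: returns (is_duplicate, result, seen).
    Python's `result.remove(existing)` is immediately followed by `break`, so iterating a
    snapshot of `result` is exact; there `existing ∈ result`, so `remove?` is `some` and
    `.getD` never takes its default. -/
def pvInnerA (kw kwl : String) (result : List String) (seen : PySem.Set String) :
    List String → Bool × List String × PySem.Set String
  | [] => (false, result, seen)
  | e :: rest =>
    let el := PySem.Str.lower e
    if PySem.Str.isIn kwl el || PySem.Str.isIn el kwl then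
      if PySem.Str.len kw < PySem.Str.len e then
        (true, result, seen)
      else if PySem.Str.len kw > PySem.Str.len e ∧ kwl ≠ el then
        (false, (PySem.List.remove? result e).getD result, PySem.Set.discard seen el)
      else pvInnerA kw kwl result seen rest
    else pvInnerA kw kwl result seen rest

/-- one iteration of A's outer `for kw in sorted_kws` loop. -/
def pvStepA (st : List String × PySem.Set String) (kw : String) :
    List String × PySem.Set String :=
  let kwl := PySem.Str.lower kw
  let r := pvInnerA kw kwl st.1 st.2 st.1
  if !r.1 && !(PySem.Set.contains r.2.2 kwl) then
    (r.2.1 ++ [kw], PySem.Set.add r.2.2 kwl)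
  else
    (r.2.1, r.2.2)

def remove_similar_keywords_py (keywords : List String) : List String :=
  if keywords = [] then []
  else
    ((PySem.List.sorted keywords (fun k => PySem.Str.len k) true).foldl pvStepA
      ([], PySem.Set.empty)).1

-- ===== PORT B =====
/-- B's inner scan of the table: only the strictly longer prefix can contain `kl`,
    so it breaks at the first entry of length ≤ `lk`; `false` = do not keep. -/
def pvScanB (lk : Int) (kl : String) : List (Int × String) → Bool
  | [] => true
  | (n, low) :: rest =>
    if n ≤ lk then true
    else if PySem.Str.isIn kl low then false
    else pvScanB lk kl rest

/-- one iteration of B's pass; `p` is the pair (kw, table[i]) of the keyword and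
    its precomputed (length, lowercase) entry. -/
def pvStepB (table : List (Int × String)) (st : List String × PySem.Set String)
    (p : String × Int × String) : List String × PySem.Set String :=
  if PySem.Set.contains st.2 p.2.2 then st
  else if pvScanB p.2.1 p.2.2 table then (st.1 ++ [p.1], PySem.Set.add st.2 p.2.2)
  else st

def remove_similar_keywords_py_alt (keywords : List String) : List String :=
  let skws := PySem.List.sorted keywords (fun k => PySem.Str.len k) true
  let table := skws.map (fun k => (PySem.Str.len k, PySem.Str.lower k))
  ((skws.zip table).foldl (pvStepB table) ([], PySem.Set.empty)).1

-- ===== PRECONDITION & SPEC =====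
def Spec_remove_similar_keywords_py (keywords : List String) (out : List String) : Prop := out = remove_similar_keywords_py_alt keywords
instance (keywords : List String) (out : List String) : Decidable (Spec_remove_similar_keywords_py keywords out) := by unfold Spec_remove_similar_keywords_py; infer_instance

-- ===== CLAIM (what is proved, stated in full; the proofs are below) =====
def Claim_equal_remove_similar_keywords_py : Prop := ∀ (keywords : List String), Dom_remove_similar_keywords_py keywords → Spec_remove_similar_keywords_py keywords (remove_similar_keywords_py keywords)

-- ===== LEMMAS AND PROOFS =====

/-- lowercase of a string's character list. -/
def pvLow (s : String) : List Char := PySem.Chars.lower s.toList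

lemma pvLow_length (s : String) : (pvLow s).length = s.toList.length := by
  simp [pvLow, PySem.Chars.lower]

lemma pvLow_eq_of_lower_eq {a b : String} (h : PySem.Str.lower a = PySem.Str.lower b) :
    pvLow a = pvLow b := by
  simp only [pvLow, ← PySem.Str.toList_lower, h]

/-- "some strictly longer input keyword contains kw's lowercase" — the test B performs. -/
def pvBad (keywords : List String) (kw : String) : Prop :=
  ∃ y ∈ keywords, kw.toList.length < y.toList.length ∧ pvLow kw <:+: pvLow y

/-- B's `any` over the precomputed table decides `pvBad`. -/
lemma anyB_iff (keywords : List String) (kw : String) :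
    ((keywords.map (fun k => (PySem.Str.len k, PySem.Str.lower k))).any
        (fun nl => decide (PySem.Str.len kw < nl.1) && PySem.Str.isIn (PySem.Str.lower kw) nl.2))
      = true ↔ pvBad keywords kw := by
  unfold pvBad
  simp [List.any_map, List.any_eq_true, Function.comp, PySem.Chars.isIn_iff_infix,
    PySem.Str.len_eq, PySem.Str.toList_lower, pvLow, Nat.cast_lt]

/-- A's inner loop, characterised: on a result whose members are at least as long as `kw`
    it only computes the duplicate flag (the replace branch is dead). -/
lemma innerA_char (kw : String) (result : List String) (seen : PySem.Set String)
    (rs : List String) (h : ∀ e ∈ rs, kw.toList.length ≤ e.toList.length) :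
    pvInnerA kw (PySem.Str.lower kw) result seen rs
      = (rs.any (fun e => decide (PySem.Str.len kw < PySem.Str.len e) &&
          PySem.Str.isIn (PySem.Str.lower kw) (PySem.Str.lower e)), result, seen) := by
  induction rs with
  | nil => simp [pvInnerA]
  | cons e rest ih =>
    have he : kw.toList.length ≤ e.toList.length := h e (by simp)
    have hrest : ∀ x ∈ rest, kw.toList.length ≤ x.toList.length := fun x hx => h x (by simp [hx])
    by_cases h2 : kw.toList.length < e.toList.length
    · have hlt : kw.length < e.length := by simpa [← String.length_toList] using h2
      have hnot : PySem.Chars.isIn (PySem.Chars.lower e.toList) (PySem.Chars.lower kw.toList) = false := by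
        rw [Bool.eq_false_iff]
        intro hc
        have hle := ((PySem.Chars.isIn_iff_infix _ _).1 hc).length_le
        have h1 := pvLow_length e
        have h2' := pvLow_length kw
        simp only [pvLow] at h1 h2'
        omega
      by_cases h1 : PySem.Chars.isIn (PySem.Chars.lower kw.toList) (PySem.Chars.lower e.toList) = true
      · simp [pvInnerA, h1, hnot, hlt]
      · rw [Bool.not_eq_true] at h1
        simp [pvInnerA, h1, hnot, ih hrest]
    · have hlt : ¬ kw.length < e.length := by
        simpa [← String.length_toList] using (by omega : ¬ kw.toList.length < e.toList.length)
      have hgt : ¬ e.length < kw.length := by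
        simpa [← String.length_toList] using (by omega : ¬ e.toList.length < kw.toList.length)
      simp [pvInnerA, hlt, hgt, ih hrest]

/-- the full table of a keyword list: (length, lowercase) of the length-sorted keywords. -/
def pvTable (keywords : List String) : List (Int × String) :=
  (PySem.List.sorted keywords (fun k => PySem.Str.len k) true).map
    (fun k => (PySem.Str.len k, PySem.Str.lower k))

/-- B's step, re-expressed on the keyword alone (the zipped table entry is computed). -/
def pvStepB' (table : List (Int × String)) (st : List String × PySem.Set String)
    (kw : String) : List String × PySem.Set String :=
  pvStepB table st (kw, PySem.Str.len kw, PySem.Str.lower kw)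

lemma pv_zip_map {α β : Type} (l : List α) (g : α → β) :
    l.zip (l.map g) = l.map (fun x => (x, g x)) := by
  induction l with
  | nil => rfl
  | cons a l ih => simp [ih]

lemma alt_eq_fold (keywords : List String) :
    remove_similar_keywords_py_alt keywords
      = ((PySem.List.sorted keywords (fun k => PySem.Str.len k) true).foldl
          (pvStepB' (pvTable keywords)) ([], PySem.Set.empty)).1 := by
  show (((PySem.List.sorted keywords (fun k => PySem.Str.len k) true).zip
      ((PySem.List.sorted keywords (fun k => PySem.Str.len k) true).map
        (fun k => (PySem.Str.len k, PySem.Str.lower k)))).foldl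
      (pvStepB (pvTable keywords)) ([], PySem.Set.empty)).1 = _
  rw [pv_zip_map, List.foldl_map]
  rfl

/-- on a length-nonincreasing table, B's breaking scan is the negated containment `any`. -/
lemma scanB_eq (lk : Int) (kl : String) (table : List (Int × String))
    (hp : table.Pairwise (fun a b => b.1 ≤ a.1)) :
    pvScanB lk kl table
      = !(table.any fun nl => decide (lk < nl.1) && PySem.Str.isIn kl nl.2) := by
  induction table with
  | nil => rfl
  | cons a rest ih =>
    obtain ⟨ha, hp'⟩ := List.pairwise_cons.1 hp
    obtain ⟨n, low⟩ := a
    rw [List.any_cons]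
    by_cases hle : n ≤ lk
    · have hrest : (rest.any fun nl => decide (lk < nl.1) && PySem.Str.isIn kl nl.2) = false := by
        rw [List.any_eq_false]
        intro x hx
        have := ha x hx
        simp only [Bool.and_eq_true, decide_eq_true_iff, not_and]
        intro hcontra
        omega
      rw [show pvScanB lk kl ((n, low) :: rest) = true from by simp [pvScanB, hle]]
      rw [hrest, show (decide (lk < n) && PySem.Str.isIn kl low) = false from by
        simp [show ¬ lk < n by omega]]
      rfl
    · have hlt : lk < n := by omega
      by_cases hin : PySem.Chars.isIn kl.toList low.toList = true
      · rw [show pvScanB lk kl ((n, low) :: rest) = false from by simp [pvScanB, hle, hin]]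
        rw [show (decide (lk < n) && PySem.Str.isIn kl low) = true from by simp [hlt, hin]]
        rfl
      · rw [Bool.not_eq_true] at hin
        rw [show pvScanB lk kl ((n, low) :: rest) = pvScanB lk kl rest from by
          simp [pvScanB, hle, hin]]
        rw [ih hp', show (decide (lk < n) && PySem.Str.isIn kl low) = false from by simp [hin]]
        simp

lemma table_pairwise (keywords : List String) :
    (pvTable keywords).Pairwise (fun a b => b.1 ≤ a.1) := by
  exact List.Pairwise.map _ (fun a b h => h)
    (PySem.List.sorted_pairwise_rev keywords (fun k => PySem.Str.len k))

/-- B's scan decides "no strictly longer input keyword contains kw's lowercase". -/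
lemma scan_iff (keywords : List String) (kw : String) :
    pvScanB (PySem.Str.len kw) (PySem.Str.lower kw) (pvTable keywords) = true
      ↔ ¬ pvBad keywords kw := by
  rw [scanB_eq _ _ _ (table_pairwise keywords)]
  have hperm : (pvTable keywords).Perm
      (keywords.map fun k => (PySem.Str.len k, PySem.Str.lower k)) :=
    (PySem.List.sorted_perm keywords (fun k => PySem.Str.len k) true).map _
  rw [List.Perm.any_eq hperm, Bool.not_eq_true']
  constructor
  · intro h hbad
    rw [(anyB_iff keywords kw).2 hbad] at h
    simp at h
  · intro h
    rw [Bool.eq_false_iff]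
    exact fun ht => h ((anyB_iff keywords kw).1 ht)

lemma stepB_fst_subset (table : List (Int × String)) (q : List String) :
    ∀ (st : List String × PySem.Set String) (x : String),
      x ∈ (q.foldl (pvStepB' table) st).1 → x ∈ st.1 ∨ x ∈ q := by
  induction q with
  | nil => intro st x hx; exact Or.inl hx
  | cons a q ih =>
    intro st x hx
    rcases ih _ x hx with hmem | hmem
    · simp only [pvStepB', pvStepB] at hmem
      split_ifs at hmem with h1 h2
      · exact Or.inl hmem
      · rcases List.mem_append.1 hmem with hm | hm
        · exact Or.inl hm
        · simp at hm; simp [hm]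
      · exact Or.inl hmem
    · simp [hmem]

lemma stepB_fst_mono (table : List (Int × String)) (q : List String) :
    ∀ (st : List String × PySem.Set String) (x : String),
      x ∈ st.1 → x ∈ (q.foldl (pvStepB' table) st).1 := by
  induction q with
  | nil => intro st x hx; exact hx
  | cons a q ih =>
    intro st x hx
    refine ih _ x ?_
    simp only [pvStepB', pvStepB]
    split_ifs <;> simp [hx]

lemma stepB_snd_subset (table : List (Int × String)) (q : List String) :
    ∀ (st : List String × PySem.Set String) (x : String),
      x ∈ (q.foldl (pvStepB' table) st).2 → x ∈ st.2 ∨ ∃ z ∈ q, x = PySem.Str.lower z := by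
  induction q with
  | nil => intro st x hx; exact Or.inl hx
  | cons a q ih =>
    intro st x hx
    rcases ih _ x hx with hmem | hmem
    · simp only [pvStepB', pvStepB] at hmem
      split_ifs at hmem with h1 h2
      · exact Or.inl hmem
      · rcases (PySem.Set.mem_add _ _ _).1 hmem with hm | hm
        · exact Or.inl hm
        · exact Or.inr ⟨a, by simp, hm⟩
      · exact Or.inl hmem
    · obtain ⟨z, hz, hzx⟩ := hmem
      exact Or.inr ⟨z, by simp [hz], hzx⟩

/-- first element of a list whose lowercase is `t`, with the split witnessing it. -/
lemma first_lower_split (l : List String) (t : String)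
    (h : ∃ x ∈ l, PySem.Str.lower x = t) :
    ∃ l1 y l2, l = l1 ++ y :: l2 ∧ PySem.Str.lower y = t ∧
      ∀ z ∈ l1, PySem.Str.lower z ≠ t := by
  induction l with
  | nil => simp at h
  | cons a l ih =>
    by_cases ha : PySem.Str.lower a = t
    · exact ⟨[], a, l, rfl, ha, by simp⟩
    · obtain ⟨x, hx, hxt⟩ := h
      rcases List.mem_cons.1 hx with rfl | hx'
      · exact absurd hxt ha
      · obtain ⟨l1, y, l2, hsplit, hy, hl1⟩ := ih ⟨x, hx', hxt⟩
        refine ⟨a :: l1, y, l2, by simp [hsplit], hy, ?_⟩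
        intro z hz
        rcases List.mem_cons.1 hz with rfl | hz'
        · exact ha
        · exact hl1 z hz'

/-- the crux: if some input keyword is strictly longer than `kw` and contains its lowercase,
    then B's state after the sorted prefix `p` already holds such a keyword (take a longest
    such input keyword; its first same-lowercase occurrence in `p` was kept). -/
lemma bad_witness (keywords p rest : List String) (kw : String)
    (hL : PySem.List.sorted keywords (fun k => PySem.Str.len k) true = p ++ kw :: rest)
    (hbad : pvBad keywords kw) :
    ∃ e ∈ (p.foldl (pvStepB' (pvTable keywords)) ([], PySem.Set.empty)).1,
      kw.toList.length < e.toList.length ∧ pvLow kw <:+: pvLow e := by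
  classical
  set W := keywords.filter
    (fun y => decide (kw.toList.length < y.toList.length ∧ pvLow kw <:+: pvLow y)) with hWdef
  obtain ⟨y, hy, hylen, hyinf⟩ := hbad
  have hyW : y ∈ W := by
    rw [hWdef, List.mem_filter]
    exact ⟨hy, decide_eq_true ⟨hylen, hyinf⟩⟩
  cases hmax : PySem.List.max? W (fun y => y.toList.length) with
  | none =>
    rw [PySem.List.max?_eq_none_iff] at hmax
    simp [hmax] at hyW
  | some m =>
    have hmW := PySem.List.max?_mem hmax
    have hmMax := PySem.List.max?_isMax hmax
    rw [hWdef, List.mem_filter, decide_eq_true_iff] at hmW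
    obtain ⟨hmkey, hmlen, hminf⟩ := hmW
    -- the sorted list, pairwise nonincreasing lengths
    have hpw := PySem.List.sorted_pairwise_rev keywords (fun k => PySem.Str.len k)
    rw [hL] at hpw
    have hpwApp := (List.pairwise_append.1 hpw).2.1
    have hrest_le : ∀ b ∈ rest, b.toList.length ≤ kw.toList.length := by
      intro b hb
      have := (List.pairwise_cons.1 hpwApp).1 b hb
      simpa [PySem.Str.len_eq, Nat.cast_le] using this
    -- m lies in the prefix p
    have hmp : m ∈ p := by
      have hmL : m ∈ p ++ kw :: rest := by
        rw [← hL, PySem.List.mem_sorted]; exact hmkey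
      rcases List.mem_append.1 hmL with h | h
      · exact h
      · rcases List.mem_cons.1 h with rfl | h'
        · omega
        · have := hrest_le m h'; omega
    obtain ⟨l1, y0, l2, hps, hy0, hl1⟩ :=
      first_lower_split p (PySem.Str.lower m) ⟨m, hmp, rfl⟩
    have hlowEq : pvLow y0 = pvLow m := pvLow_eq_of_lower_eq hy0
    have hleny0 : y0.toList.length = m.toList.length := by
      rw [← pvLow_length, hlowEq, pvLow_length]
    -- B's state after l1
    set st1 := l1.foldl (pvStepB' (pvTable keywords))
      (([], PySem.Set.empty) : List String × PySem.Set String) with hst1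
    -- y0 is appended at its own step
    have hc : PySem.Set.contains st1.2 (PySem.Str.lower y0) = false := by
      rw [Bool.eq_false_iff]
      intro hc
      have hmem := (PySem.Set.contains_iff _ _).1 hc
      rcases stepB_snd_subset (pvTable keywords) l1 _ _ hmem with h | ⟨z, hz, hzx⟩
      · simp [PySem.Set.empty] at h
      · exact hl1 z hz (by rw [← hzx, hy0])
    have hnotbad : ¬ pvBad keywords y0 := by
      rintro ⟨z, hz, hzlen, hzinf⟩
      have hzW : z ∈ W := by
        rw [hWdef, List.mem_filter, decide_eq_true_iff]
        refine ⟨hz, by omega, ?_⟩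
        calc pvLow kw <:+: pvLow m := hminf
          _ = pvLow y0 := hlowEq.symm
          _ <:+: pvLow z := hzinf
      have := hmMax z hzW
      omega
    have hscan : pvScanB (PySem.Str.len y0) (PySem.Str.lower y0) (pvTable keywords) = true :=
      (scan_iff keywords y0).2 hnotbad
    have hy0mem : y0 ∈ (p.foldl (pvStepB' (pvTable keywords)) ([], PySem.Set.empty)).1 := by
      rw [hps, List.foldl_append, List.foldl_cons]
      refine stepB_fst_mono (pvTable keywords) l2 _ y0 ?_
      show y0 ∈ (pvStepB' (pvTable keywords) st1 y0).1
      simp only [pvStepB', pvStepB, hc, hscan]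
      simp
    exact ⟨y0, hy0mem, by omega, by rw [hlowEq]; exact hminf⟩

/-- A's fold and B's fold coincide along the sorted list. -/
lemma main_fold (keywords : List String) :
    ∀ (rest p : List String),
      PySem.List.sorted keywords (fun k => PySem.Str.len k) true = p ++ rest →
      rest.foldl pvStepA
          (p.foldl (pvStepB' (pvTable keywords)) ([], PySem.Set.empty))
        = rest.foldl (pvStepB' (pvTable keywords))
          (p.foldl (pvStepB' (pvTable keywords)) ([], PySem.Set.empty)) := by
  intro rest
  induction rest with
  | nil => intro p _; rfl
  | cons kw rest' ih =>
    intro p hL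
    set st := p.foldl (pvStepB' (pvTable keywords))
      (([], PySem.Set.empty) : List String × PySem.Set String) with hst
    have hpw := PySem.List.sorted_pairwise_rev keywords (fun k => PySem.Str.len k)
    rw [hL] at hpw
    have hcross := (List.pairwise_append.1 hpw).2.2
    have hlen : ∀ e ∈ st.1, kw.toList.length ≤ e.toList.length := by
      intro e he
      rcases stepB_fst_subset (pvTable keywords) p _ e he with h | h
      · simp at h
      · have := hcross e h kw (by simp)
        simpa [PySem.Str.len_eq, Nat.cast_le] using this
    have hstep : pvStepA st kw = pvStepB' (pvTable keywords) st kw := by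
      simp only [pvStepA, innerA_char kw st.1 st.2 st.1 hlen, pvStepB', pvStepB]
      by_cases hbad : pvBad keywords kw
      · have hscan : pvScanB (PySem.Str.len kw) (PySem.Str.lower kw) (pvTable keywords) = false := by
          rw [Bool.eq_false_iff]
          exact fun ht => (scan_iff keywords kw).1 ht hbad
        obtain ⟨e, he, helen, heinf⟩ := bad_witness keywords p rest' kw hL hbad
        have hAany : (st.1.any fun e => decide (PySem.Str.len kw < PySem.Str.len e) &&
            PySem.Str.isIn (PySem.Str.lower kw) (PySem.Str.lower e)) = true := by
          refine List.any_eq_true.2 ⟨e, he, ?_⟩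
          rw [Bool.and_eq_true, decide_eq_true_iff]
          constructor
          · simp only [PySem.Str.len_eq]; exact_mod_cast helen
          · rw [PySem.Str.isIn_iff_infix]
            simpa [PySem.Str.toList_lower, pvLow] using heinf
        rw [hAany, hscan]
        simp
      · have hscan : pvScanB (PySem.Str.len kw) (PySem.Str.lower kw) (pvTable keywords) = true :=
          (scan_iff keywords kw).2 hbad
        have hAany : (st.1.any fun e => decide (PySem.Str.len kw < PySem.Str.len e) &&
            PySem.Str.isIn (PySem.Str.lower kw) (PySem.Str.lower e)) = false := by
          rw [List.any_eq_false]
          intro e he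
          simp only [Bool.and_eq_true, decide_eq_true_iff, not_and]
          intro helen hin
          refine hbad ⟨e, ?_, ?_, ?_⟩
          · rcases stepB_fst_subset (pvTable keywords) p _ e he with h | h
            · simp at h
            · have : e ∈ p ++ kw :: rest' := List.mem_append_left _ h
              rw [← hL, PySem.List.mem_sorted] at this
              exact this
          · simp only [PySem.Str.len_eq] at helen; exact_mod_cast helen
          · have := (PySem.Str.isIn_iff_infix _ _).1 hin
            simpa [PySem.Str.toList_lower, pvLow] using this
        rw [hAany, hscan]
        simp
    rw [List.foldl_cons, List.foldl_cons, hstep]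
    have hfold : pvStepB' (pvTable keywords) st kw
        = (p ++ [kw]).foldl (pvStepB' (pvTable keywords)) ([], PySem.Set.empty) := by
      rw [List.foldl_append, List.foldl_cons, List.foldl_nil]
    rw [hfold]
    exact ih (p ++ [kw]) (by rw [hL]; simp)

-- ===== VERDICT (by name: the statement is the Claim_ definition above) =====
theorem remove_similar_keywords_py_spec : Claim_equal_remove_similar_keywords_py := by
  intro keywords _
  unfold Spec_remove_similar_keywords_py
  by_cases hk : keywords = []
  · subst hk; rfl
  · rw [alt_eq_fold]
    unfold remove_similar_keywords_py
    rw [if_neg hk]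
    have h := main_fold keywords
      (PySem.List.sorted keywords (fun k => PySem.Str.len k) true) [] (by simp)
    simp only [List.foldl_nil] at h
    rw [h]
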